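-- pv_equiv track=rewrite | github.com/tkuboi/my-BottleNeck | app/net/facenet_data_generator.py | map_wine_winery
-- ===== SOURCE A (Python) =====
-- def map_wine_winery(wines_dict):
--     wine_winery_map = {}
--     winerys = {}
--     winery_id = 0
--     for wine_id in wines_dict.keys():
--         if wines_dict[wine_id][0] in winerys:
--             wine_winery_map[wine_id] = winerys[wines_dict[wine_id][0]]
--         else:
--             winerys[wines_dict[wine_id][0]] = winery_id
--             wine_winery_map[wine_id] = winery_id
--             winery_id += 1
--     return wine_winery_map
-- ===== SOURCE B (Python) =====
-- def map_wine_winery(wines_dict):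
--     # Each wine's winery id is computed independently by a closed form:
--     # the number of distinct wineries appearing strictly before the first
--     # occurrence of its own winery in the winery sequence.
--     wineries = [info[0] for info in wines_dict.values()]
--     result = {}
--     for wine_id, info in wines_dict.items():
--         first = wineries.index(info[0])
--         result[wine_id] = len(set(wineries[:first]))
--     return result
-- ===== Notes on version B (the rewrite author's own statement) =====
-- stated objective: alternative
-- what changed: Replaced the incremental first-seen id assignment (a dict index plus a running counter) by a per-wine closed form: each wine's id is computed independently as the number of distinct wineries strictly before the first occurrence of its winery in the winery sequence.
import Mathlib
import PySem

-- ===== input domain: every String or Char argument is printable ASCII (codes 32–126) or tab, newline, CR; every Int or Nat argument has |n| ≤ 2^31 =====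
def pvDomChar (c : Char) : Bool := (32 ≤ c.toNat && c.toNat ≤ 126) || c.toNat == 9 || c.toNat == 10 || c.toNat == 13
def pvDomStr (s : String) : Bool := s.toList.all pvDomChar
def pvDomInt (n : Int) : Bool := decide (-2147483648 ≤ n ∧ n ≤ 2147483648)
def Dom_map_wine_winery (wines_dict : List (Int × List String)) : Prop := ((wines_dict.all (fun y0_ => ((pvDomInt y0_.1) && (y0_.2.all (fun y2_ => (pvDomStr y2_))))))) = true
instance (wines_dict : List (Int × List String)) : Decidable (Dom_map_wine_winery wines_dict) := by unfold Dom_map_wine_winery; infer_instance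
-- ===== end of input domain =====

-- B replaces A's incremental id assignment (dict index + running counter) by a per-wine
-- closed form: each id is the number of distinct wineries before its winery's first occurrence.

-- ===== PORT A =====
-- One interleaved pass; wine_winery_map is built by appending; winerys is a PySem.Dict;
-- the manual counter winery_id is the third state component.  wines_dict[wine_id][0] is
-- ported as (pyGet? kv.2 0).getD "" — exact under Pre_, which rules out the IndexError case.
def map_wine_winery (wines_dict : List (Int × List String)) : List (Int × Int) :=
  (wines_dict.foldl
    (fun (st : List (Int × Int) × PySem.Dict String Int × Int) kv =>
      let w := (PySem.List.pyGet? kv.2 0).getD ""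
      match st.2.1.get? w with
      | some i => (st.1 ++ [(kv.1, i)], st.2.1, st.2.2)
      | none   => (st.1 ++ [(kv.1, st.2.2)], st.2.1.insert w st.2.2, st.2.2 + 1))
    ([], PySem.Dict.empty, 0)).1

-- ===== PORT B =====
-- wineries = [info[0] for info in values()]; then per wine: first = wineries.index(info[0]),
-- id = len(set(wineries[:first])).  wineries.index always succeeds (the wine's own winery is
-- in the list), so .index is ported as index? with .getD 0 — exact here.
def map_wine_winery_alt (wines_dict : List (Int × List String)) : List (Int × Int) :=
  let wineries := wines_dict.map (fun info => (PySem.List.pyGet? info.2 0).getD "")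
  wines_dict.map (fun kv =>
    let w := (PySem.List.pyGet? kv.2 0).getD ""
    let first := (PySem.List.index? wineries w).getD 0
    (kv.1, ((PySem.Set.ofList (PySem.List.slice wineries none (some (first : Int)))).length : Int)))

-- ===== PRECONDITION & SPEC =====
-- Pre_ excludes inputs with a zero-length value list, on which A raises IndexError at
-- wines_dict[wine_id][0].
def Pre_map_wine_winery (wines_dict : List (Int × List String)) : Prop :=
  ∀ kv ∈ wines_dict, kv.2 ≠ []
instance (wines_dict : List (Int × List String)) : Decidable (Pre_map_wine_winery wines_dict) := by unfold Pre_map_wine_winery; infer_instance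

def pvWitness_map_wine_winery : (List (Int × List String)) :=
  [(1, ["napa", "cab"]), (2, ["sonoma"]), (3, ["napa"]), (7, ["oak"])]

def Spec_map_wine_winery (wines_dict : List (Int × List String)) (out : List (Int × Int)) : Prop := out = map_wine_winery_alt wines_dict
instance (wines_dict : List (Int × List String)) (out : List (Int × Int)) : Decidable (Spec_map_wine_winery wines_dict out) := by unfold Spec_map_wine_winery; infer_instance

-- ===== CLAIM (what is proved, stated in full; the proofs are below) =====
def Claim_equal_map_wine_winery : Prop := ∀ (wines_dict : List (Int × List String)), Dom_map_wine_winery wines_dict → Pre_map_wine_winery wines_dict → Spec_map_wine_winery wines_dict (map_wine_winery wines_dict)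

-- ===== LEMMAS AND PROOFS =====

def pvBId (K : List String) (w : String) : Int :=
  ((PySem.Set.ofList (PySem.List.slice K none (some (((PySem.List.index? K w).getD 0 : Nat) : Int)))).length : Int)

lemma pvBId_new (P t : List String) (w : String) (hw : w ∉ P) :
    pvBId (P ++ w :: t) w = ((PySem.Set.ofList P).length : Int) := by
  have h : P ++ w :: t = (P ++ [w]) ++ t := by simp
  have hi : PySem.List.index? (P ++ w :: t) w = some P.length := by
    rw [h, PySem.List.index?_append_of_mem t (by simp)]
    exact PySem.List.index?_append_singleton_self P w hw
  unfold pvBId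
  rw [hi]
  simp only [Option.getD_some, PySem.List.slice_to_natCast, List.take_left]

def pvWkey (kv : Int × List String) : String := (PySem.List.pyGet? kv.2 0).getD ""

lemma pvOfListSnoc (P : List String) (w : String) :
    PySem.Set.ofList (P ++ [w]) = if w ∈ P then PySem.Set.ofList P else PySem.Set.ofList P ++ [w] := by
  rw [show PySem.Set.ofList (P ++ [w]) = PySem.Set.add (PySem.Set.ofList P) w by
    simp [PySem.Set.ofList_eq_foldl]]
  simp [PySem.Set.add, PySem.Set.contains, PySem.Set.mem_ofList]

lemma pvMain (l : List (Int × List String)) (P : List String)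
    (acc : List (Int × Int)) (ws : PySem.Dict String Int)
    (hws : ∀ w, ws.get? w = if w ∈ P then some (pvBId (P ++ l.map pvWkey) w) else none) :
    (l.foldl
      (fun (st : List (Int × Int) × PySem.Dict String Int × Int) kv =>
        match st.2.1.get? (pvWkey kv) with
        | some i => (st.1 ++ [(kv.1, i)], st.2.1, st.2.2)
        | none   => (st.1 ++ [(kv.1, st.2.2)], st.2.1.insert (pvWkey kv) st.2.2, st.2.2 + 1))
      (acc, ws, ((PySem.Set.ofList P).length : Int))).1
    = acc ++ l.map (fun kv => (kv.1, pvBId (P ++ l.map pvWkey) (pvWkey kv))) := by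
  induction l generalizing P acc ws with
  | nil => simp
  | cons kv l ih =>
    have hcons : P ++ (kv :: l).map pvWkey = (P ++ [pvWkey kv]) ++ l.map pvWkey := by simp
    have hiffmem : ∀ w', pvWkey kv ∈ P ∨ w' ≠ pvWkey kv →
        (w' ∈ P ++ [pvWkey kv] ↔ w' ∈ P) := by
      intro w' h
      constructor
      · intro hm
        rcases List.mem_append.mp hm with hm | hm
        · exact hm
        · simp only [List.mem_singleton] at hm
          subst hm
          rcases h with h | h
          · exact h
          · exact absurd rfl h
      · intro hm; exact List.mem_append.mpr (Or.inl hm)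
    by_cases hmem : pvWkey kv ∈ P
    · have hget : ws.get? (pvWkey kv)
          = some (pvBId ((P ++ [pvWkey kv]) ++ l.map pvWkey) (pvWkey kv)) := by
        rw [hws (pvWkey kv), ← hcons]; simp [hmem]
      have hP' : PySem.Set.ofList (P ++ [pvWkey kv]) = PySem.Set.ofList P := by
        rw [pvOfListSnoc]; simp [hmem]
      have hrec := ih (P ++ [pvWkey kv])
        (acc ++ [(kv.1, pvBId ((P ++ [pvWkey kv]) ++ l.map pvWkey) (pvWkey kv))]) ws
        (by
          intro w'
          rw [hws w']
          by_cases h' : w' ∈ P <;>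
            simp [h', hiffmem w' (Or.inl hmem), ← hcons])
      rw [hP'] at hrec
      simp only [List.foldl_cons]
      rw [hget]
      rw [hcons, List.map_cons]
      simpa using hrec
    · have hget : ws.get? (pvWkey kv) = none := by rw [hws (pvWkey kv)]; simp [hmem]
      have hnew : pvBId ((P ++ [pvWkey kv]) ++ l.map pvWkey) (pvWkey kv)
          = ((PySem.Set.ofList P).length : Int) := by
        rw [show (P ++ [pvWkey kv]) ++ l.map pvWkey = P ++ pvWkey kv :: l.map pvWkey by simp]
        exact pvBId_new P (l.map pvWkey) (pvWkey kv) hmem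
      have hnewc : pvBId (P ++ pvWkey kv :: l.map pvWkey) (pvWkey kv)
          = ((PySem.Set.ofList P).length : Int) :=
        pvBId_new P (l.map pvWkey) (pvWkey kv) hmem
      have hP' : ((PySem.Set.ofList (P ++ [pvWkey kv])).length : Int)
          = ((PySem.Set.ofList P).length : Int) + 1 := by
        rw [pvOfListSnoc]; simp [hmem]
      have hrec := ih (P ++ [pvWkey kv])
        (acc ++ [(kv.1, ((PySem.Set.ofList P).length : Int))])
        (ws.insert (pvWkey kv) ((PySem.Set.ofList P).length : Int))
        (by
          intro w'
          by_cases h' : w' = pvWkey kv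
          · subst h'
            rw [PySem.Dict.get?_insert_self]
            simp [hnewc]
          · rw [PySem.Dict.get?_insert_of_ne _ _ h', hws w']
            by_cases h'' : w' ∈ P <;>
              simp [h'', hiffmem w' (Or.inr h'), ← hcons])
      rw [hP'] at hrec
      simp only [List.foldl_cons]
      rw [hget]
      rw [hcons, List.map_cons]
      rw [hrec, hnew]
      simp

-- ===== VERDICT (by name: the statement is the Claim_ definition above) =====
theorem map_wine_winery_spec : Claim_equal_map_wine_winery := by
  intro wines_dict _ _
  unfold Spec_map_wine_winery
  have h := pvMain wines_dict [] [] PySem.Dict.empty (by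
    intro w; simp [PySem.Dict.get?, PySem.Dict.empty])
  simpa [map_wine_winery, map_wine_winery_alt, pvWkey, pvBId] using h
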